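-- pv_equiv track=rewrite | github.com/Tsujistencia/P3VS_codes | p3vs_ver9_new.py | nodeCount0
-- ===== SOURCE A (Python) =====
-- def nodeCount0(data):
--     nodeDic = {'a': 0, 'b': 0, 'c': 0, 'd': 0, 'e': 0, 'f': 0, 'g': 0, 'h': 0, 'i': 0, 'j': 0, 'k': 0, 'l': 0, 'm': 0}
--
--     for i in range(len(data)):
--         for j in range(len(data[i])):
--             node = data[i][j]
--             if node in nodeDic:
--                 nodeDic[node] += 1
--
--     return nodeDic
-- ===== SOURCE B (Python) =====
-- def nodeCount0(data):
--     flat = [el for row in data for el in row]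
--     return {c: flat.count(c) for c in 'abcdefghijklm'}
-- ===== Notes on version B (the rewrite author's own statement) =====
-- stated objective: idiomatic
-- what changed: B flattens the 2D data once and builds the result with a dict comprehension over the fixed 13 target letters using list.count, instead of A's index-driven nested loops that test membership and increment a pre-built dict per element.
import Mathlib
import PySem

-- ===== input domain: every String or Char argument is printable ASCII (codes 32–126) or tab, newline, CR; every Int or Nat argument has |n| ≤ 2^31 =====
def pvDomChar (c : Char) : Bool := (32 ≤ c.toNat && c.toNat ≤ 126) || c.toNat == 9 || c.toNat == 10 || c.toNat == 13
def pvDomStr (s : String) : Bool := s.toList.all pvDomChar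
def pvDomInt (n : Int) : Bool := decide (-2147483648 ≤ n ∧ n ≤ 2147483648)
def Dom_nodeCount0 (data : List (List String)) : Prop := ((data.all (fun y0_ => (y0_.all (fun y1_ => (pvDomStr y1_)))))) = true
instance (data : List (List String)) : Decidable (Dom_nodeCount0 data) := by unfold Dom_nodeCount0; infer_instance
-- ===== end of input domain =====

-- B tallies by flattening once and counting each of the fixed 13 letters; A walks the 2D data by index and increments a pre-built dict.

-- ===== PORT A =====
def nodeCount0 (data : List (List String)) : List (String × Int) :=
  let nodeDic : PySem.Dict String Int := PySem.Dict.ofList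
    [("a", 0), ("b", 0), ("c", 0), ("d", 0), ("e", 0), ("f", 0), ("g", 0),
     ("h", 0), ("i", 0), ("j", 0), ("k", 0), ("l", 0), ("m", 0)]
  ((PySem.List.pyRange 0 (PySem.List.len data) 1).foldl (fun d i =>
    (PySem.List.pyRange 0 (PySem.List.len (PySem.List.pyGetD data i [])) 1).foldl (fun d j =>
      let node := PySem.List.pyGetD (PySem.List.pyGetD data i []) j ""
      if d.contains node then d.modify node 0 (· + 1) else d) d) nodeDic).items

-- ===== PORT B =====
def nodeCount0_alt (data : List (List String)) : List (String × Int) :=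
  let flat := data.flatMap (fun row => row)
  ["a", "b", "c", "d", "e", "f", "g", "h", "i", "j", "k", "l", "m"].map
    (fun c => (c, (flat.count c : Int)))

-- ===== PRECONDITION & SPEC =====
def Spec_nodeCount0 (data : List (List String)) (out : List (String × Int)) : Prop := out = nodeCount0_alt data
instance (data : List (List String)) (out : List (String × Int)) : Decidable (Spec_nodeCount0 data out) := by unfold Spec_nodeCount0; infer_instance

-- ===== CLAIM (what is proved, stated in full; the proofs are below) =====
def Claim_equal_nodeCount0 : Prop := ∀ (data : List (List String)), Dom_nodeCount0 data → Spec_nodeCount0 data (nodeCount0 data)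

-- ===== LEMMAS AND PROOFS =====

-- the per-element step of A's loop
def pvStep (d : PySem.Dict String Int) (x : String) : PySem.Dict String Int :=
  if d.contains x then d.modify x 0 (· + 1) else d

lemma pvStep_keys (d : PySem.Dict String Int) (x : String) : (pvStep d x).keys = d.keys := by
  unfold pvStep
  split_ifs with h
  · rw [PySem.Dict.keys_modify, PySem.Dict.keys_insert_of_contains]
    simpa using h
  · rfl

lemma pvFold_keys (l : List String) (d : PySem.Dict String Int) :
    (l.foldl pvStep d).keys = d.keys := by
  induction l generalizing d with
  | nil => rfl
  | cons x t ih => simp [List.foldl_cons, ih, pvStep_keys]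

lemma pvFold_getD (l : List String) (d : PySem.Dict String Int) (v : String) :
    (l.foldl pvStep d).getD v 0 =
      d.getD v 0 + (if d.contains v then (l.count v : Int) else 0) := by
  induction l generalizing d with
  | nil => simp
  | cons x t ih =>
    rw [List.foldl_cons, ih]
    have hcont : (pvStep d x).contains v = d.contains v := by
      rw [PySem.Dict.contains_eq_decide_mem_keys, PySem.Dict.contains_eq_decide_mem_keys,
        pvStep_keys]
    rw [hcont]
    unfold pvStep
    by_cases hx : d.contains x = true
    · rw [if_pos hx, PySem.Dict.getD_modify]
      by_cases hvx : v = x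
      · subst hvx
        simp [hx]
        omega
      · rw [if_neg hvx]
        by_cases hv : d.contains v = true
        · simp [hv, Ne.symm hvx]
        · simp [hv] at *
    · rw [if_neg hx]
      by_cases hvx : v = x
      · subst hvx
        simp [hx]
      · by_cases hv : d.contains v = true
        · simp [hv, Ne.symm hvx]
        · simp [hv]

-- ===== VERDICT (by name: the statement is the Claim_ definition above) =====
theorem nodeCount0_spec : Claim_equal_nodeCount0 := by
  intro data _
  show nodeCount0 data = nodeCount0_alt data
  simp only [nodeCount0, nodeCount0_alt]
  have hinner : ∀ (row : List String) (d : PySem.Dict String Int),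
      (PySem.List.pyRange 0 (PySem.List.len row) 1).foldl (fun d j =>
        let node := PySem.List.pyGetD row j ""
        if d.contains node then d.modify node 0 (· + 1) else d) d = row.foldl pvStep d := by
    intro row d
    have h := PySem.List.foldl_pyRange_pyGetD row "" pvStep d (a := 0) (by norm_num)
    simpa [pvStep] using h
  have hbody : (fun (d : PySem.Dict String Int) (i : Int) =>
      (PySem.List.pyRange 0 (PySem.List.len (PySem.List.pyGetD data i [])) 1).foldl (fun d j =>
        let node := PySem.List.pyGetD (PySem.List.pyGetD data i []) j ""
        if d.contains node then d.modify node 0 (· + 1) else d) d)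
      = (fun d i => (PySem.List.pyGetD data i []).foldl pvStep d) := by
    funext d i
    exact hinner _ d
  rw [hbody, PySem.List.foldl_pyRange_pyGetD data [] (fun d row => row.foldl pvStep d) _ (a := 0) (by norm_num)]
  simp only [Int.toNat_zero, List.drop_zero]
  rw [← List.foldl_flatten]
  have hflt : data.flatMap (fun row => row) = data.flatten := by
    simp [List.flatMap_def]
  rw [← hflt]
  set d0 : PySem.Dict String Int := PySem.Dict.ofList
    [("a", 0), ("b", 0), ("c", 0), ("d", 0), ("e", 0), ("f", 0), ("g", 0),
     ("h", 0), ("i", 0), ("j", 0), ("k", 0), ("l", 0), ("m", 0)] with hd0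
  set flat := data.flatMap (fun row => row) with hflat
  have hkeys : (flat.foldl pvStep d0).keys =
      ["a", "b", "c", "d", "e", "f", "g", "h", "i", "j", "k", "l", "m"] := by
    rw [pvFold_keys]; decide
  have hnd : (flat.foldl pvStep d0).keys.Nodup := by rw [hkeys]; decide
  rw [PySem.Dict.items_eq_map_keys _ hnd 0, hkeys]
  apply List.map_congr_left
  intro c hc
  rw [pvFold_getD]
  have h0 : d0.getD c 0 = 0 ∧ d0.contains c = true := by
    fin_cases hc <;> exact ⟨by decide, by decide⟩
  rw [h0.1, h0.2, if_pos rfl, zero_add]
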